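-- pv_equiv track=rewrite | github.com/nolanruss/object-counter | dataset.py | gen_cell_filenames
-- ===== SOURCE A (Python) =====
-- def gen_cell_filenames(cellsOrdots):
--     files = []
--     for i in range(3):
--         if (i == 2):
--             files.append('200' + str(cellsOrdots) + '.png')
--             break
--         for j in range(10):
--             for k in range(10):
--                 if ((i + j + k) > 0):
--                     files.append(str(i) + str(j) + str(k) + str(cellsOrdots) + '.png')
--     return files
-- ===== SOURCE B (Python) =====
-- def gen_cell_filenames(cellsOrdots):
--     # single flat pass: filenames are the 3-digit zero-padded numbers 1..200
--     return [f"{n:03d}{cellsOrdots}.png" for n in range(1, 201)]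
-- ===== Notes on version B (the rewrite author's own statement) =====
-- stated objective: simpler
-- what changed: Replaced A's three nested loops with break and a skip guard by a single comprehension over range(1, 201) that zero-pads each number to three digits.
import Mathlib
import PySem

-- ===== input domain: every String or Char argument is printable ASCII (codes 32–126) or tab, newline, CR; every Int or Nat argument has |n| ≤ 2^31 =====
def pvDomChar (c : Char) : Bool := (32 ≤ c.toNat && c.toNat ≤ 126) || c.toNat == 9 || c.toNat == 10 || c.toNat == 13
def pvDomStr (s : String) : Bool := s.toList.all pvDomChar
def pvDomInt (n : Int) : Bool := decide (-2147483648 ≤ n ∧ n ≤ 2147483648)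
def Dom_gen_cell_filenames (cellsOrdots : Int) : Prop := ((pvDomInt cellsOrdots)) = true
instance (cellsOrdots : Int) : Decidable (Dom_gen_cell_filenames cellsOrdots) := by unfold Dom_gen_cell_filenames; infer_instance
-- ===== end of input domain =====

-- B: one flat pass over 1..200 with zero-padded formatting instead of A's nested digit loops (objective: simpler).


-- ===== PORT A =====
-- loop over i with a 'break': recursion over the remaining range, stopping when i == 2
def pvALoop (c : Int) : List Int → List String → List String
  | [], files => files
  | i :: rest, files =>
    if i == 2 then
      files ++ [(("200" ++ PySem.Int.toStr c) ++ ".png")]   -- append then break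
    else
      pvALoop c rest
        ((PySem.List.pyRange 0 10 1).foldl (fun fs j =>
          (PySem.List.pyRange 0 10 1).foldl (fun fs k =>
            if i + j + k > 0 then
              fs ++ [((((PySem.Int.toStr i ++ PySem.Int.toStr j) ++ PySem.Int.toStr k)
                       ++ PySem.Int.toStr c) ++ ".png")]
            else fs) fs) files)

def gen_cell_filenames (cellsOrdots : Int) : List String :=
  pvALoop cellsOrdots (PySem.List.pyRange 0 3 1) []

-- ===== PORT B =====
-- f"{n:03d}" : exact zero-padding for the nonnegative n < 1000 produced here (1..200)
def pvPad3 (n : Int) : String :=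
  if n < 10 then "00" ++ PySem.Int.toStr n
  else if n < 100 then "0" ++ PySem.Int.toStr n
  else PySem.Int.toStr n

def gen_cell_filenames_alt (cellsOrdots : Int) : List String :=
  (PySem.List.pyRange 1 201 1).map (fun n => (pvPad3 n ++ PySem.Int.toStr cellsOrdots) ++ ".png")

-- ===== PRECONDITION & SPEC =====
def Spec_gen_cell_filenames (cellsOrdots : Int) (out : List String) : Prop := out = gen_cell_filenames_alt cellsOrdots
instance (cellsOrdots : Int) (out : List String) : Decidable (Spec_gen_cell_filenames cellsOrdots out) := by unfold Spec_gen_cell_filenames; infer_instance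

-- ===== CLAIM (what is proved, stated in full; the proofs are below) =====
def Claim_equal_gen_cell_filenames : Prop := ∀ (cellsOrdots : Int), Dom_gen_cell_filenames cellsOrdots → Spec_gen_cell_filenames cellsOrdots (gen_cell_filenames cellsOrdots)

-- ===== LEMMAS AND PROOFS =====

-- proof helper: the common "attach suffix" function (p ++ str(c) ++ '.png')
def pvSuffix (s p : String) : String := (p ++ s) ++ ".png"

-- A's loop computing only the literal prefixes (no reference to cellsOrdots)
def pvPrefixLoop : List Int → List String → List String
  | [], ps => ps
  | i :: rest, ps =>
    if i == 2 then ps ++ ["200"]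
    else
      pvPrefixLoop rest
        ((PySem.List.pyRange 0 10 1).foldl (fun ps j =>
          (PySem.List.pyRange 0 10 1).foldl (fun ps k =>
            if i + j + k > 0 then
              ps ++ [(PySem.Int.toStr i ++ PySem.Int.toStr j) ++ PySem.Int.toStr k]
            else ps) ps) ps)

-- map commutes with a fold whose step commutes with map
theorem pv_foldl_comm_map (g : String → String) (l : List Int)
    (step step' : List String → Int → List String)
    (hcomm : ∀ acc x, step (acc.map g) x = (step' acc x).map g) :
    ∀ acc : List String, l.foldl step (acc.map g) = (l.foldl step' acc).map g := by
  induction l with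
  | nil => intro acc; rfl
  | cons x xs ih =>
    intro acc
    simp only [List.foldl]
    rw [hcomm acc x, ih]

theorem pvALoop_map (c : Int) : ∀ (l : List Int) (acc : List String),
    pvALoop c l (acc.map (pvSuffix (PySem.Int.toStr c)))
      = (pvPrefixLoop l acc).map (pvSuffix (PySem.Int.toStr c)) := by
  intro l
  induction l with
  | nil => intro acc; rfl
  | cons i rest ih =>
    intro acc
    by_cases hi : i = 2
    · subst hi
      simp [pvALoop, pvPrefixLoop, pvSuffix]
    · have hi' : (i == 2) = false := by simp [hi]
      simp only [pvALoop, pvPrefixLoop, hi', Bool.false_eq_true, if_false]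
      rw [pv_foldl_comm_map (pvSuffix (PySem.Int.toStr c)) _ _
            (fun ps j => (PySem.List.pyRange 0 10 1).foldl (fun ps k =>
              if i + j + k > 0 then
                ps ++ [(PySem.Int.toStr i ++ PySem.Int.toStr j) ++ PySem.Int.toStr k]
              else ps) ps)]
      · exact ih _
      · intro acc' j
        rw [pv_foldl_comm_map (pvSuffix (PySem.Int.toStr c)) _ _
              (fun ps k => if i + j + k > 0 then
                ps ++ [(PySem.Int.toStr i ++ PySem.Int.toStr j) ++ PySem.Int.toStr k]
              else ps)]
        intro acc'' k
        by_cases hk : i + j + k > 0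
        · simp [hk, pvSuffix]
        · simp [hk]

-- the two closed prefix lists coincide (kernel evaluation)
set_option maxRecDepth 100000 in
theorem pv_prefixes_eq :
    pvPrefixLoop (PySem.List.pyRange 0 3 1) []
      = (PySem.List.pyRange 1 201 1).map pvPad3 := by decide

-- ===== VERDICT (by name: the statement is the Claim_ definition above) =====
theorem gen_cell_filenames_spec : Claim_equal_gen_cell_filenames := by
  intro c _
  show gen_cell_filenames c = gen_cell_filenames_alt c
  have hA : gen_cell_filenames c
      = (pvPrefixLoop (PySem.List.pyRange 0 3 1) []).map (pvSuffix (PySem.Int.toStr c)) := by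
    have := pvALoop_map c (PySem.List.pyRange 0 3 1) []
    simpa [gen_cell_filenames] using this
  have hB : gen_cell_filenames_alt c
      = ((PySem.List.pyRange 1 201 1).map pvPad3).map (pvSuffix (PySem.Int.toStr c)) := by
    simp [gen_cell_filenames_alt, List.map_map, pvSuffix, Function.comp]
  rw [hA, hB, pv_prefixes_eq]
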